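-- pv_equiv track=rewrite | github.com/pasmod/masnavi | masnavi/loader.py | sort_poems
-- ===== SOURCE A (Python) =====
-- def sort_poems(verses):
--     """Sorts poems based on their last characters in the verses.
--
--     Args:
--         verses: a list of verses.
--     Returns:
--         text: text containing the sorted poems.
--     """
--     mydic = {}
--     for verse in verses:
--         if verse[-2] not in mydic:
--             mydic[verse[-2]] = []
--         mydic[verse[-2]].append(verse)
--     text = ""
--     for k in mydic.keys():
--         for v in mydic[k]:
--             text = text + v
--     return text
-- ===== SOURCE B (Python) =====
-- def sort_poems(verses):
--     """Sorts poems based on their last characters in the verses.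
--
--     Args:
--         verses: a list of verses.
--     Returns:
--         text: text containing the sorted poems.
--     """
--     order = []
--     seen = set()
--     for verse in verses:
--         c = verse[-2]
--         if c not in seen:
--             seen.add(c)
--             order.append(c)
--     return "".join(v for c in order for v in verses if v[-2] == c)
-- ===== Notes on version B (the rewrite author's own statement) =====
-- stated objective: alternative
-- what changed: Instead of bucketing verses into a dict of lists and walking the buckets, B records only the first-seen order of the second-last characters, then emits each group with a filter scan over the original list and a single join; no per-key lists are maintained.
import Mathlib
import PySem

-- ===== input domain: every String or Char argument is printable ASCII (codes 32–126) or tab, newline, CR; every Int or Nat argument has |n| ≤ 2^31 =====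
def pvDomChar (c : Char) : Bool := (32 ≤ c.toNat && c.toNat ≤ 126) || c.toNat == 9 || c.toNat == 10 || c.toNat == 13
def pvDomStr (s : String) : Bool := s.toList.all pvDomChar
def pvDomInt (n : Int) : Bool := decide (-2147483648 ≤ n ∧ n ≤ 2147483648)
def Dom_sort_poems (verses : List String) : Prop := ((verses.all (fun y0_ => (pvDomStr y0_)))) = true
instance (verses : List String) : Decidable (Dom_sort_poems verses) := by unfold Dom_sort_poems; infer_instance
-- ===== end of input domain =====

-- B groups verses by their second-last character without a dict of buckets: it records the
-- first-seen order of the keys, then emits each group by a filter scan and one join (objective: alternative).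

-- ===== PORT A =====
def sort_poems (verses : List String) : String :=
  let mydic : PySem.Dict Char (List String) :=
    verses.foldl (fun d verse =>
      match PySem.Str.pyGet? verse (-2) with
      | none => d      -- verse[-2] raises IndexError in Python; excluded by Pre_
      | some c =>
        let d' := if d.contains c then d else d.insert c []
        d'.modify c [] (fun x => x ++ [verse])) PySem.Dict.empty
  mydic.keys.foldl (fun text k =>
    (mydic.getD k []).foldl (fun text v => text ++ v) text) ""

-- ===== PORT B =====
def sort_poems_alt (verses : List String) : String :=
  let st := verses.foldl (fun (p : List Char × PySem.Set Char) verse =>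
      match PySem.Str.pyGet? verse (-2) with
      | none => p      -- verse[-2] raises IndexError in Python; excluded by Pre_
      | some c => if PySem.Set.contains p.2 c then p else (p.1 ++ [c], p.2.add c))
    ([], PySem.Set.empty)
  PySem.Str.join "" (st.1.flatMap (fun c =>
    verses.filter (fun v => PySem.Str.pyGet? v (-2) == some c)))

-- ===== PRECONDITION & SPEC =====
-- Pre_ excludes exactly the inputs on which Python raises IndexError: a verse of length < 2
-- makes verse[-2] raise in A (and in B).
def Pre_sort_poems (verses : List String) : Prop := ∀ v ∈ verses, 2 ≤ PySem.Str.len v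
instance (verses : List String) : Decidable (Pre_sort_poems verses) := by unfold Pre_sort_poems; infer_instance
def pvWitness_sort_poems : List String := ["xa!", "yb!", "za!", "w?!"]

def Spec_sort_poems (verses : List String) (out : String) : Prop := out = sort_poems_alt verses
instance (verses : List String) (out : String) : Decidable (Spec_sort_poems verses out) := by unfold Spec_sort_poems; infer_instance

-- ===== CLAIM (what is proved, stated in full; the proofs are below) =====
def Claim_equal_sort_poems : Prop := ∀ (verses : List String), Dom_sort_poems verses → Pre_sort_poems verses → Spec_sort_poems verses (sort_poems verses)

-- ===== LEMMAS AND PROOFS =====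

-- proof-only abbreviation: the key of a verse (normal form over List Char)
def pvKey (v : String) : Option Char := PySem.List.pyGet? v.toList (-2)
def pvPairs (vs : List String) : List (Char × String) :=
  vs.filterMap (fun v => (pvKey v).map (fun c => (c, v)))

-- A's loop, with the skip of bad verses fused away, is the modify-loop over (key, verse) pairs
theorem pvAfold (vs : List String) (d : PySem.Dict Char (List String)) :
    vs.foldl (fun d verse =>
      match PySem.List.pyGet? verse.toList (-2) with
      | none => d
      | some c =>
        let d' := if d.contains c then d else d.insert c []
        d'.modify c [] (fun x => x ++ [verse])) d
    = (pvPairs vs).foldl (fun d p => d.modify p.1 [] (fun x => x ++ [p.2])) d := by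
  induction vs generalizing d with
  | nil => rfl
  | cons v vs ih =>
    simp only [List.foldl_cons, pvPairs, List.filterMap_cons]
    cases h : pvKey v with
    | none =>
      simp only [pvKey] at h
      simp [h, ih, pvPairs]
    | some c =>
      simp only [pvKey] at h
      simp only [h, Option.map_some, List.foldl_cons]
      have hstep : (let d' := if d.contains c then d else d.insert c ([] : List String)
          d'.modify c [] (fun x => x ++ [v])) = d.modify c [] (fun x => x ++ [v]) := by
        by_cases hc : d.contains c
        · simp [hc]
        · simp only [hc, Bool.false_eq_true, not_false_eq_true, if_neg,
            PySem.Dict.modify, PySem.Dict.getD_insert_self, PySem.Dict.insert_insert_self]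
          rw [PySem.Dict.getD_of_not_contains d [] (by simpa using hc)]
      rw [hstep, ih]
      rfl

-- the bucket of key c is the filter of the original list
theorem pvBucket (vs : List String) (c : Char) :
    ((pvPairs vs).filter (fun p => p.1 == c)).map (fun p => p.2)
      = vs.filter (fun v => PySem.List.pyGet? v.toList (-2) == some c) := by
  induction vs with
  | nil => rfl
  | cons v vs ih =>
    simp only [pvPairs, List.filterMap_cons, List.filter_cons]
    cases h : pvKey v with
    | none =>
      simp only [pvKey] at h
      simp only [h, Option.map_none]
      simpa [pvPairs] using ih
    | some c' =>
      simp only [pvKey] at h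
      by_cases hc : c' = c <;> simp_all [pvPairs]

-- the keys of the pairs are the keys of the verses
theorem pvMapFst (vs : List String) :
    (pvPairs vs).map (fun p => p.1) = vs.filterMap pvKey := by
  simp [pvPairs, List.map_filterMap, Option.map_map, Function.comp_def]

-- B's first loop: order and seen stay the same list; the result is Set.update
theorem pvBfold (vs : List String) (o : List Char) :
    vs.foldl (fun (p : List Char × PySem.Set Char) verse =>
      match PySem.List.pyGet? verse.toList (-2) with
      | none => p
      | some c => if PySem.Set.contains p.2 c then p else (p.1 ++ [c], p.2.add c)) (o, o)
    = (PySem.Set.update o (vs.filterMap pvKey), PySem.Set.update o (vs.filterMap pvKey)) := by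
  induction vs generalizing o with
  | nil => rfl
  | cons v vs ih =>
    simp only [List.foldl_cons, List.filterMap_cons]
    cases h : pvKey v with
    | none =>
      simp only [pvKey] at h
      simp only [h, ih]
    | some c =>
      simp only [pvKey] at h
      simp only [h]
      by_cases hc : PySem.Set.contains o c
      · have hm : c ∈ o := by simpa [PySem.Set.contains] using hc
        have ha : PySem.Set.add o c = o := by
          simp [PySem.Set.add, PySem.Set.contains, hm]
        simp only [hc, if_true, PySem.Set.update, List.foldl_cons, ha] at ih ⊢
        exact ih o
      · have hm : c ∉ o := by simpa [PySem.Set.contains] using hc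
        have ha : PySem.Set.add o c = o ++ [c] := by
          simp [PySem.Set.add, PySem.Set.contains, hm]
        simp only [hc, Bool.false_eq_true, if_false, PySem.Set.update, List.foldl_cons, ha] at ih ⊢
        exact ih (o ++ [c])

-- foldl of ++ over strings, on the character level
theorem pvConcatInner (l : List String) (t : String) :
    (l.foldl (fun text v => text ++ v) t).toList
      = t.toList ++ (l.map String.toList).flatten := by
  induction l generalizing t with
  | nil => simp
  | cons x xs ih => simp [ih, String.toList_append]

theorem pvConcatOuter (f : Char → List String) (ks : List Char) (t : String) :
    (ks.foldl (fun text k => (f k).foldl (fun text v => text ++ v) text) t).toList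
      = t.toList ++ ((ks.flatMap f).map String.toList).flatten := by
  induction ks generalizing t with
  | nil => simp
  | cons k ks ih => simp [ih, pvConcatInner]

theorem pvIntercalateNil (l : List (List Char)) : ([] : List Char).intercalate l = l.flatten := by
  induction l with
  | nil => rfl
  | cons x xs ih => cases xs <;> simp_all [List.intercalate, List.intersperse]

theorem pvJoinNil (parts : List String) :
    (PySem.Str.join "" parts).toList = (parts.map String.toList).flatten := by
  simp [PySem.Str.join, PySem.Chars.join, String.toList_ofList, String.toList_empty, pvIntercalateNil]

-- ===== VERDICT (by name: the statement is the Claim_ definition above) =====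
theorem sort_poems_spec : Claim_equal_sort_poems := by
  intro verses _ _
  unfold Spec_sort_poems sort_poems sort_poems_alt
  apply String.toList_inj.mp
  simp only [PySem.Str.pyGet?, PySem.Chars.pyGet?_eq_listPyGet?, PySem.Set.empty]
  rw [pvAfold, pvBfold, pvJoinNil, pvConcatOuter]
  have hkeys : ((pvPairs verses).foldl (fun d p => d.modify p.1 [] (fun x => x ++ [p.2]))
      PySem.Dict.empty).keys = PySem.Set.update [] (verses.filterMap pvKey) := by
    rw [show (fun (d : PySem.Dict Char (List String)) (p : Char × String) =>
          d.modify p.1 [] (fun x => x ++ [p.2]))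
        = (fun d p => d.modify ((fun q : Char × String => q.1) p) []
            ((fun (_ : PySem.Dict Char (List String)) (p : Char × String) (x : List String) => x ++ [p.2]) d p)) from rfl,
      PySem.Dict.keys_foldl_modify_key, pvMapFst]
    rfl
  rw [hkeys]
  simp only [String.toList_empty, List.nil_append]
  refine congrArg _ (congrArg _ (List.flatMap_congr ?_))
  intro k _
  rw [← pvBucket, PySem.Dict.getD_foldl_modify_append]
  simp
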